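-- pv_equiv track=rewrite | github.com/xiongchenyan/cxPyLib | cxBase/TextBase.py | UWNonOverlap
-- ===== SOURCE A (Python) =====
-- def UWNonOverlap(vCol,hTerm,WindowSize):
--     cnt = 0
--     st = 0
--     while st < len(vCol):
--         hMid = dict(hTerm)
--         for i in range(st,min(st+WindowSize,len(vCol))):
--             if vCol[i] in hMid:
--                 del hMid[vCol[i]]
--                 if len(hMid) == 0:
--                     cnt += 1
--                     st = i
--                     break
--         st += 1
--     return cnt
-- ===== SOURCE B (Python) =====
-- def UWNonOverlap(vCol, hTerm, WindowSize):
--     need = set(dict(hTerm))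
--     if not need:
--         return 0
--     cnt = 0
--     st = 0
--     last = {}
--     for i, w in enumerate(vCol):
--         if w in need:
--             last[w] = i
--         if st < i - WindowSize + 1:
--             st = i - WindowSize + 1
--         if all(last.get(t, -1) >= st for t in need):
--             cnt += 1
--             st = i + 1
--     return cnt
-- ===== Notes on version B (the rewrite author's own statement) =====
-- stated objective: faster
-- what changed: A restarts a fresh scan of up to WindowSize positions (rebuilding the term dict) from every window start; B makes one left-to-right pass over vCol, maintaining per required term the index of its last occurrence plus a sliding window start, so each window is decided in O(T) without rescanning.
import Mathlib
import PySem

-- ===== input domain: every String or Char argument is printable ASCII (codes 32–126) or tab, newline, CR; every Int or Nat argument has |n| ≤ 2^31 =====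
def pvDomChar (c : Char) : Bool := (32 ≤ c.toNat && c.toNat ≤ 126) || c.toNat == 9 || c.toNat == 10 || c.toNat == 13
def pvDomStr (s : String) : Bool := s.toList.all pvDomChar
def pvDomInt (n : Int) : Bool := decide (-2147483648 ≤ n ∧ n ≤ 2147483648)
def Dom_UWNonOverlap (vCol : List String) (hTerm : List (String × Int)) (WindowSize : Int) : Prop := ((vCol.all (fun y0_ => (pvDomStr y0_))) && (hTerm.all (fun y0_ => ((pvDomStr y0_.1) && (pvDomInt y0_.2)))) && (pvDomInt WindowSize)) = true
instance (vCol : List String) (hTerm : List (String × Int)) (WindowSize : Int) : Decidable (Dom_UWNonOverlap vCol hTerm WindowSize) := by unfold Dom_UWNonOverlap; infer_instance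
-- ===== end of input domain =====

-- B replaces A's restart-and-rescan window search by a single left-to-right pass that keeps,
-- per required term, the index of its last occurrence (objective: faster worst case).


-- ===== PORT A =====
-- A-side helper: the inner `for i in range(st, min(st+WindowSize, len(vCol)))` loop.
-- `i` is the current index, `k` the number of indices still to scan (every index visited is
-- in range, so `pyGetD … ""` is exactly Python's `vCol[i]`); `some i` = the `break` at index i.
def UWNonOverlap_for (vCol : List String) (hMid : PySem.Dict String Int) (i k : Nat) : Option Nat :=
  match k with
  | 0 => none
  | k + 1 =>
    let w := PySem.List.pyGetD vCol (i : Int) ""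
    if hMid.contains w then
      let hMid' := hMid.erase w
      if hMid'.size = 0 then some i
      else UWNonOverlap_for vCol hMid' (i + 1) k
    else UWNonOverlap_for vCol hMid (i + 1) k

-- number of iterations of the inner for loop started at st: max(0, min(st+WindowSize, len) - st)
def UWNonOverlap_winlen (vCol : List String) (WindowSize : Int) (st : Nat) : Nat :=
  (min ((st : Int) + WindowSize) ((vCol.length : Nat) : Int) - (st : Int)).toNat

-- termination helper for the outer while loop: a break index is ≥ the window start
theorem UWNonOverlap_for_ge (vCol : List String) :
    ∀ (k i : Nat) (hMid : PySem.Dict String Int) (j : Nat),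
      UWNonOverlap_for vCol hMid i k = some j → i ≤ j := by
  intro k
  induction k with
  | zero => intro i hMid j h; simp [UWNonOverlap_for] at h
  | succ k ih =>
    intro i hMid j h
    simp only [UWNonOverlap_for] at h
    split at h
    · split at h
      · exact le_of_eq (Option.some.inj h)
      · exact Nat.le_of_succ_le (ih (i + 1) _ j h)
    · exact Nat.le_of_succ_le (ih (i + 1) _ j h)

-- A's outer `while st < len(vCol)` loop; `st = i; break` followed by `st += 1` is `st := i + 1`.
def UWNonOverlap_loop (vCol : List String) (hTerm : List (String × Int)) (WindowSize : Int) (st : Nat) : Int :=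
  if h : st < vCol.length then
    match hfor : UWNonOverlap_for vCol (PySem.Dict.ofList hTerm) st (UWNonOverlap_winlen vCol WindowSize st) with
    | some i => 1 + UWNonOverlap_loop vCol hTerm WindowSize (i + 1)
    | none => UWNonOverlap_loop vCol hTerm WindowSize (st + 1)
  else 0
termination_by vCol.length - st
decreasing_by
  · have := UWNonOverlap_for_ge vCol _ _ _ _ hfor; omega
  · omega

def UWNonOverlap (vCol : List String) (hTerm : List (String × Int)) (WindowSize : Int) : Int :=
  UWNonOverlap_loop vCol hTerm WindowSize 0

-- ===== PORT B =====
-- B-side helper: the body of B's single `for i, w in enumerate(vCol)` loop;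
-- state = (cnt, st, last), where last maps each required term to its last position seen.
def UWNonOverlap_step (need : PySem.Set String) (WindowSize : Int)
    (s : Int × Int × PySem.Dict String Int) (p : Int × String) : Int × Int × PySem.Dict String Int :=
  let last := if PySem.Set.contains need p.2 then s.2.2.insert p.2 p.1 else s.2.2
  let st := if s.2.1 < p.1 - WindowSize + 1 then p.1 - WindowSize + 1 else s.2.1
  if need.all (fun t => decide (st ≤ last.getD t (-1))) then (s.1 + 1, p.1 + 1, last)
  else (s.1, st, last)

def UWNonOverlap_alt (vCol : List String) (hTerm : List (String × Int)) (WindowSize : Int) : Int :=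
  let need : PySem.Set String := PySem.Set.ofList (PySem.Dict.ofList hTerm).keys
  if need.isEmpty then 0
  else
    ((PySem.List.enumerate vCol 0).foldl (UWNonOverlap_step need WindowSize)
      (0, 0, PySem.Dict.empty)).1

-- ===== PRECONDITION & SPEC =====
def Spec_UWNonOverlap (vCol : List String) (hTerm : List (String × Int)) (WindowSize : Int) (out : Int) : Prop := out = UWNonOverlap_alt vCol hTerm WindowSize
instance (vCol : List String) (hTerm : List (String × Int)) (WindowSize : Int) (out : Int) : Decidable (Spec_UWNonOverlap vCol hTerm WindowSize out) := by unfold Spec_UWNonOverlap; infer_instance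

-- ===== CLAIM (what is proved, stated in full; the proofs are below) =====
def Claim_equal_UWNonOverlap : Prop := ∀ (vCol : List String) (hTerm : List (String × Int)) (WindowSize : Int), Dom_UWNonOverlap vCol hTerm WindowSize → Spec_UWNonOverlap vCol hTerm WindowSize (UWNonOverlap vCol hTerm WindowSize)

-- ===== LEMMAS AND PROOFS =====

-- `t` occurs in vCol at some position p with lo ≤ p < hi
def pvOcc (vCol : List String) (t : String) (lo : Int) (hi : Nat) : Prop :=
  ∃ p : Nat, p < hi ∧ lo ≤ (p : Int) ∧ vCol[p]? = some t

-- every term of K occurs in vCol in the index band [lo, hi)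
def pvCovers (vCol : List String) (K : List String) (lo : Int) (hi : Nat) : Prop :=
  ∀ t ∈ K, pvOcc vCol t lo hi

-- index of the last occurrence of t among positions < i, or -1 (B's `last.get(t, -1)`)
def pvLastIdx (vCol : List String) (t : String) : Nat → Int
  | 0 => -1
  | i + 1 => if vCol[i]? = some t then (i : Int) else pvLastIdx vCol t i

theorem pvOcc_mono_hi {vCol : List String} {t : String} {lo : Int} {hi hi' : Nat}
    (h : hi ≤ hi') (ho : pvOcc vCol t lo hi) : pvOcc vCol t lo hi' := by
  obtain ⟨p, hp1, hp2, hp3⟩ := ho; exact ⟨p, lt_of_lt_of_le hp1 h, hp2, hp3⟩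

theorem pvOcc_anti_lo {vCol : List String} {t : String} {lo lo' : Int} {hi : Nat}
    (h : lo' ≤ lo) (ho : pvOcc vCol t lo hi) : pvOcc vCol t lo' hi := by
  obtain ⟨p, hp1, hp2, hp3⟩ := ho; exact ⟨p, hp1, le_trans h hp2, hp3⟩

theorem pvCovers_anti_lo {vCol : List String} {K : List String} {lo lo' : Int} {hi : Nat}
    (h : lo' ≤ lo) (hc : pvCovers vCol K lo hi) : pvCovers vCol K lo' hi :=
  fun t ht => pvOcc_anti_lo h (hc t ht)

theorem pvCovers_mono_hi {vCol : List String} {K : List String} {lo : Int} {hi hi' : Nat}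
    (h : hi ≤ hi') (hc : pvCovers vCol K lo hi) : pvCovers vCol K lo hi' :=
  fun t ht => pvOcc_mono_hi h (hc t ht)

theorem pvOcc_empty {vCol : List String} {t : String} {lo : Int} {hi : Nat}
    (h : (hi : Int) ≤ lo) : ¬ pvOcc vCol t lo hi := by
  rintro ⟨p, hp1, hp2, -⟩
  have : (p : Int) < (hi : Int) := by exact_mod_cast hp1
  omega

theorem pvOcc_succ_iff {vCol : List String} {t : String} {lo : Int} {i : Nat} :
    pvOcc vCol t lo (i + 1) ↔ pvOcc vCol t lo i ∨ (lo ≤ (i : Int) ∧ vCol[i]? = some t) := by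
  constructor
  · rintro ⟨p, hp1, hp2, hp3⟩
    rcases Nat.lt_succ_iff_lt_or_eq.mp hp1 with h | h
    · exact Or.inl ⟨p, h, hp2, hp3⟩
    · subst h; exact Or.inr ⟨hp2, hp3⟩
  · rintro (⟨p, hp1, hp2, hp3⟩ | ⟨h1, h2⟩)
    · exact ⟨p, Nat.lt_succ_of_lt hp1, hp2, hp3⟩
    · exact ⟨i, Nat.lt_succ_self i, h1, h2⟩

theorem pvLastIdx_ge_iff (vCol : List String) (t : String) {lo : Int} (hlo : 0 ≤ lo) (i : Nat) :
    lo ≤ pvLastIdx vCol t i ↔ pvOcc vCol t lo i := by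
  induction i with
  | zero =>
    simp only [pvLastIdx]
    constructor
    · intro h; omega
    · intro h; exact absurd h (pvOcc_empty (by omega))
  | succ i ih =>
    simp only [pvLastIdx]
    split
    · rename_i hv
      constructor
      · intro h; exact ⟨i, Nat.lt_succ_self i, h, hv⟩
      · rintro ⟨p, hp1, hp2, -⟩
        have : (p : Int) ≤ (i : Int) := by exact_mod_cast Nat.lt_succ_iff.mp hp1
        omega
    · rename_i hv
      rw [ih, pvOcc_succ_iff]
      constructor
      · exact Or.inl
      · rintro (h | ⟨-, h⟩)
        · exact h
        · exact absurd h hv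

-- ---- Dict facts about erase / size (no PySem lemma covers erase) ----
theorem dict_contains_erase (d : PySem.Dict String Int) (w t : String) :
    ((d.erase w).contains t) = (d.contains t && !(t == w)) := by
  obtain ⟨items⟩ := d
  simp only [PySem.Dict.erase, PySem.Dict.contains, List.any_filter]
  induction items with
  | nil => simp
  | cons p rest ih =>
    simp only [List.any_cons, ih]
    by_cases h1 : p.1 = t
    · subst h1
      by_cases h2 : p.1 = w <;> simp_all [beq_iff_eq]
    · have : (p.1 == t) = false := by simp [beq_eq_false_iff_ne, h1]
      simp only [this, Bool.and_false, Bool.false_or]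

theorem dict_size_zero_iff (d : PySem.Dict String Int) :
    d.size = 0 ↔ ∀ t, d.contains t = false := by
  obtain ⟨items⟩ := d
  cases items with
  | nil => simp [PySem.Dict.size, PySem.Dict.contains]
  | cons p rest =>
    simp only [PySem.Dict.size, PySem.Dict.contains]
    constructor
    · intro h; simp at h
    · intro h
      have := h p.1
      simp at this

-- ---- characterization of A's inner for loop ----
theorem for_spec (vCol : List String) (K : List String) (st : Int) :
    ∀ (k i : Nat) (hMid : PySem.Dict String Int),
      st ≤ (i : Int) →
      i + k ≤ vCol.length →
      (∀ t, hMid.contains t = true ↔ (t ∈ K ∧ ¬ pvOcc vCol t st i)) →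
      (∃ t ∈ K, ¬ pvOcc vCol t st i) →
      ∀ j : Nat, (UWNonOverlap_for vCol hMid i k = some j ↔
        (i ≤ j ∧ j < i + k ∧ pvCovers vCol K st (j + 1) ∧ ¬ pvCovers vCol K st j)) := by
  intro k
  induction k with
  | zero =>
    intro i hMid _ _ _ _ j
    simp only [UWNonOverlap_for]
    constructor
    · intro h; cases h
    · rintro ⟨h1, h2, -, -⟩; exact absurd (lt_of_le_of_lt h1 h2) (by omega)
  | succ k ih =>
    intro i hMid hst hlen hinv hne j
    have hilen : i < vCol.length := by omega
    have hvi : vCol[i]? = some vCol[i] := List.getElem?_eq_getElem hilen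
    have hw : PySem.List.pyGetD vCol (i : Int) "" = vCol[i] := by
      rw [PySem.List.pyGetD_natCast]
      exact List.getD_eq_getElem vCol "" hilen
    have hsucc : ∀ t, pvOcc vCol t st (i + 1) ↔ (pvOcc vCol t st i ∨ t = vCol[i]) := by
      intro t
      rw [pvOcc_succ_iff, hvi]
      simp only [Option.some.injEq]
      constructor
      · rintro (h | ⟨-, h⟩)
        · exact Or.inl h
        · exact Or.inr h.symm
      · rintro (h | h)
        · exact Or.inl h
        · exact Or.inr ⟨hst, h.symm⟩
    simp only [UWNonOverlap_for, hw]
    by_cases hc : hMid.contains vCol[i] = true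
    · obtain ⟨hwK, hwno⟩ := (hinv vCol[i]).mp hc
      rw [if_pos hc]
      have hinv' : ∀ t, (hMid.erase vCol[i]).contains t = true ↔
          (t ∈ K ∧ ¬ pvOcc vCol t st (i + 1)) := by
        intro t
        rw [dict_contains_erase]
        simp only [Bool.and_eq_true, Bool.not_eq_eq_eq_not, Bool.not_true, beq_eq_false_iff_ne]
        rw [hinv t]
        constructor
        · rintro ⟨⟨htK, hno⟩, hne_w⟩
          refine ⟨htK, fun h => ?_⟩
          rcases (hsucc t).mp h with h' | h'
          · exact hno h'
          · exact hne_w h'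
        · rintro ⟨htK, hno'⟩
          refine ⟨⟨htK, fun h => hno' ((hsucc t).mpr (Or.inl h))⟩, fun h => ?_⟩
          exact hno' ((hsucc t).mpr (Or.inr h))
      by_cases hsz : (hMid.erase vCol[i]).size = 0
      · rw [if_pos hsz]
        have hcov : pvCovers vCol K st (i + 1) := by
          intro t ht
          by_contra hno
          have := (hinv' t).mpr ⟨ht, hno⟩
          rw [(dict_size_zero_iff _).mp hsz t] at this
          cases this
        constructor
        · intro h
          injection h with h
          subst h
          exact ⟨le_rfl, by omega, hcov, fun hcv => hwno (hcv vCol[i] hwK)⟩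
        · rintro ⟨h1, h2, hcv1, hcv2⟩
          have hji : j = i := by
            by_contra hne'
            have : i + 1 ≤ j := by omega
            exact hcv2 (pvCovers_mono_hi this hcov)
          rw [hji]
      · rw [if_neg hsz]
        have hne' : ∃ t ∈ K, ¬ pvOcc vCol t st (i + 1) := by
          have : ¬ ∀ t, (hMid.erase vCol[i]).contains t = false := by
            intro hall
            exact hsz ((dict_size_zero_iff _).mpr hall)
          push_neg at this
          obtain ⟨t, ht⟩ := this
          have : (hMid.erase vCol[i]).contains t = true := by
            cases h : (hMid.erase vCol[i]).contains t
            · exact absurd h ht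
            · rfl
          exact ⟨t, ((hinv' t).mp this).1, ((hinv' t).mp this).2⟩
        have ihs := ih (i + 1) (hMid.erase vCol[i]) (by omega) (by omega) hinv' hne' j
        rw [ihs]
        constructor
        · rintro ⟨h1, h2, h3, h4⟩
          exact ⟨by omega, by omega, h3, h4⟩
        · rintro ⟨h1, h2, h3, h4⟩
          have hji : j ≠ i := by
            rintro rfl
            obtain ⟨t, htK, hno⟩ := hne'
            exact hno (h3 t htK)
          exact ⟨by omega, by omega, h3, h4⟩
    · rw [if_neg hc]
      have hwfact : ¬ (vCol[i] ∈ K ∧ ¬ pvOcc vCol vCol[i] st i) := fun h => hc ((hinv vCol[i]).mpr h)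
      have hinv'' : ∀ t, hMid.contains t = true ↔ (t ∈ K ∧ ¬ pvOcc vCol t st (i + 1)) := by
        intro t
        rw [hinv t]
        constructor
        · rintro ⟨htK, hno⟩
          refine ⟨htK, fun h => ?_⟩
          rcases (hsucc t).mp h with h' | h'
          · exact hno h'
          · subst h'; exact hwfact ⟨htK, hno⟩
        · rintro ⟨htK, hno⟩
          exact ⟨htK, fun h => hno ((hsucc t).mpr (Or.inl h))⟩
      have hne'' : ∃ t ∈ K, ¬ pvOcc vCol t st (i + 1) := by
        obtain ⟨t, htK, hno⟩ := hne
        refine ⟨t, htK, fun h => ?_⟩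
        rcases (hsucc t).mp h with h' | h'
        · exact hno h'
        · subst h'; exact hwfact ⟨htK, hno⟩
      have ihs := ih (i + 1) hMid (by omega) (by omega) hinv'' hne'' j
      rw [ihs]
      constructor
      · rintro ⟨h1, h2, h3, h4⟩
        exact ⟨by omega, by omega, h3, h4⟩
      · rintro ⟨h1, h2, h3, h4⟩
        have hji : j ≠ i := by
          rintro rfl
          obtain ⟨t, htK, hno⟩ := hne''
          exact hno (h3 t htK)
        exact ⟨by omega, by omega, h3, h4⟩

theorem for_none_of_empty (vCol : List String) :
    ∀ (k i : Nat) (hMid : PySem.Dict String Int),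
      (∀ t, hMid.contains t = false) →
      UWNonOverlap_for vCol hMid i k = none := by
  intro k
  induction k with
  | zero => intro i hMid _; simp [UWNonOverlap_for]
  | succ k ih =>
    intro i hMid h
    simp only [UWNonOverlap_for]
    rw [if_neg (by simp [h])]
    exact ih (i + 1) hMid h

-- ---- unfolding equations of A's outer loop ----
theorem loop_of_ge (vCol : List String) (hTerm : List (String × Int)) (W : Int) (st : Nat)
    (h : vCol.length ≤ st) : UWNonOverlap_loop vCol hTerm W st = 0 := by
  conv_lhs => rw [UWNonOverlap_loop.eq_def]
  rw [dif_neg (by omega)]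

theorem loop_of_some (vCol : List String) (hTerm : List (String × Int)) (W : Int) (st i : Nat)
    (h : st < vCol.length)
    (hi : UWNonOverlap_for vCol (PySem.Dict.ofList hTerm) st (UWNonOverlap_winlen vCol W st) = some i) :
    UWNonOverlap_loop vCol hTerm W st = 1 + UWNonOverlap_loop vCol hTerm W (i + 1) := by
  conv_lhs => rw [UWNonOverlap_loop.eq_def]
  rw [dif_pos h]
  split
  · rename_i i' hfor
    rw [hi] at hfor
    cases hfor
    rfl
  · rename_i hfor
    rw [hi] at hfor
    cases hfor

theorem loop_of_none (vCol : List String) (hTerm : List (String × Int)) (W : Int) (st : Nat)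
    (h : st < vCol.length)
    (hi : UWNonOverlap_for vCol (PySem.Dict.ofList hTerm) st (UWNonOverlap_winlen vCol W st) = none) :
    UWNonOverlap_loop vCol hTerm W st = UWNonOverlap_loop vCol hTerm W (st + 1) := by
  conv_lhs => rw [UWNonOverlap_loop.eq_def]
  rw [dif_pos h]
  split
  · rename_i i' hfor
    rw [hi] at hfor
    cases hfor
  · rfl

theorem loop_shift (vCol : List String) (hTerm : List (String × Int)) (W : Int) :
    ∀ (d s : Nat),
      (∀ u, s ≤ u → u < s + d → u < vCol.length →
        UWNonOverlap_for vCol (PySem.Dict.ofList hTerm) u (UWNonOverlap_winlen vCol W u) = none) →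
      UWNonOverlap_loop vCol hTerm W s = UWNonOverlap_loop vCol hTerm W (s + d) := by
  intro d
  induction d with
  | zero => intro s _; rfl
  | succ d ih =>
    intro s h
    by_cases hs : s < vCol.length
    · rw [loop_of_none vCol hTerm W s hs (h s le_rfl (by omega) hs)]
      have := ih (s + 1) (fun u hu1 hu2 hu3 => h u (by omega) (by omega) hu3)
      rw [this]
      congr 1
      omega
    · rw [loop_of_ge vCol hTerm W s (by omega), loop_of_ge vCol hTerm W (s + (d + 1)) (by omega)]

theorem loop_zero_of_fails (vCol : List String) (hTerm : List (String × Int)) (W : Int) (st : Nat)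
    (h : ∀ u, st ≤ u → u < vCol.length →
      UWNonOverlap_for vCol (PySem.Dict.ofList hTerm) u (UWNonOverlap_winlen vCol W u) = none) :
    UWNonOverlap_loop vCol hTerm W st = 0 := by
  by_cases hs : st < vCol.length
  · rw [loop_shift vCol hTerm W (vCol.length - st) st
      (fun u hu1 _ hu3 => h u hu1 hu3)]
    exact loop_of_ge vCol hTerm W _ (by omega)
  · exact loop_of_ge vCol hTerm W st (by omega)

-- ---- the main correspondence: B's fold = A's loop ----
theorem mem_of_ne_nil {K : List String} (h : K ≠ []) : ∃ t, t ∈ K := by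
  cases K with
  | nil => exact absurd rfl h
  | cons a l => exact ⟨a, List.mem_cons_self⟩

-- A's window at start u finds no break index when no band [st, j] with j < i is fully covered
theorem inner_none_of_nc (vCol : List String) (hTerm : List (String × Int)) (W : Int)
    (hK : (PySem.Dict.ofList hTerm).keys ≠ []) (st : Int) (i : Nat) (u : Nat)
    (hul : u ≤ vCol.length)
    (hstu : st ≤ (u : Int))
    (hnc : ∀ j : Nat, j ≤ i → ¬ pvCovers vCol (PySem.Dict.ofList hTerm).keys st j)
    (hwin : ∀ j : Nat, j < u + UWNonOverlap_winlen vCol W u → j + 1 ≤ i) :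
    UWNonOverlap_for vCol (PySem.Dict.ofList hTerm) u (UWNonOverlap_winlen vCol W u) = none := by
  cases hfor : UWNonOverlap_for vCol (PySem.Dict.ofList hTerm) u (UWNonOverlap_winlen vCol W u) with
  | none => rfl
  | some j =>
    exfalso
    obtain ⟨t0, ht0⟩ := mem_of_ne_nil hK
    have hlen : u + UWNonOverlap_winlen vCol W u ≤ vCol.length := by
      unfold UWNonOverlap_winlen; omega
    have hinv : ∀ t, (PySem.Dict.ofList hTerm).contains t = true ↔
        (t ∈ (PySem.Dict.ofList hTerm).keys ∧ ¬ pvOcc vCol t (u : Int) u) := by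
      intro t
      rw [PySem.Dict.contains_iff_mem_keys]
      exact ⟨fun h => ⟨h, pvOcc_empty le_rfl⟩, fun h => h.1⟩
    have hspec := for_spec vCol (PySem.Dict.ofList hTerm).keys (u : Int)
      (UWNonOverlap_winlen vCol W u) u (PySem.Dict.ofList hTerm) le_rfl hlen hinv
      ⟨t0, ht0, pvOcc_empty le_rfl⟩ j
    obtain ⟨h1, h2, hcv, -⟩ := hspec.mp hfor
    exact hnc (j + 1) (hwin j h2) (pvCovers_anti_lo hstu hcv)

theorem alt_fold_main (vCol : List String) (hTerm : List (String × Int)) (W : Int) (hW : 1 ≤ W)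
    (hK : (PySem.Dict.ofList hTerm).keys ≠ []) :
    ∀ (suf : List String) (i : Nat) (cnt st : Int) (last : PySem.Dict String Int),
      vCol.drop i = suf →
      0 ≤ st → st ≤ (i : Int) →
      (∀ t ∈ (PySem.Dict.ofList hTerm).keys, last.getD t (-1) = pvLastIdx vCol t i) →
      (∀ j : Nat, j ≤ i → ¬ pvCovers vCol (PySem.Dict.ofList hTerm).keys st j) →
      ((PySem.List.enumerate suf (i : Int)).foldl
          (UWNonOverlap_step (PySem.Set.ofList (PySem.Dict.ofList hTerm).keys) W) (cnt, st, last)).1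
        = cnt + UWNonOverlap_loop vCol hTerm W st.toNat := by
  intro suf
  induction suf with
  | nil =>
    intro i cnt st last hdrop hst0 hsti hlast hnc
    rw [PySem.List.enumerate_nil, List.foldl_nil]
    have hni : vCol.length ≤ i := by
      have := congrArg List.length hdrop
      simp only [List.length_drop, List.length_nil] at this
      omega
    have hz : UWNonOverlap_loop vCol hTerm W st.toNat = 0 := by
      apply loop_zero_of_fails
      intro u hu hun
      refine inner_none_of_nc vCol hTerm W hK st i u (by omega) (by omega) hnc (fun j hj => ?_)
      have : u + UWNonOverlap_winlen vCol W u ≤ vCol.length := by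
        unfold UWNonOverlap_winlen; omega
      omega
    rw [hz]; ring
  | cons w rest ih =>
    intro i cnt st last hdrop hst0 hsti hlast hnc
    have hilen : i < vCol.length := by
      have := congrArg List.length hdrop
      simp only [List.length_drop, List.length_cons] at this
      omega
    have hvi0 : vCol.drop i = vCol[i] :: vCol.drop (i + 1) := List.drop_eq_getElem_cons hilen
    rw [hvi0] at hdrop
    have hw : vCol[i] = w := (List.cons.inj hdrop).1
    have hrest : vCol.drop (i + 1) = rest := (List.cons.inj hdrop).2
    have hvi : vCol[i]? = some w := by rw [List.getElem?_eq_getElem hilen, hw]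
    rw [PySem.List.enumerate_cons, List.foldl_cons]
    simp only [UWNonOverlap_step]
    set last1 := if PySem.Set.contains (PySem.Set.ofList (PySem.Dict.ofList hTerm).keys) w
        then last.insert w (i : Int) else last with hlast1def
    set st1 := if st < (i : Int) - W + 1 then (i : Int) - W + 1 else st with hst1def
    have hmemneed : ∀ t, (PySem.Set.contains (PySem.Set.ofList (PySem.Dict.ofList hTerm).keys) t = true)
        ↔ t ∈ (PySem.Dict.ofList hTerm).keys := by
      intro t
      rw [show PySem.Set.contains (PySem.Set.ofList (PySem.Dict.ofList hTerm).keys) t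
            = List.contains (PySem.Set.ofList (PySem.Dict.ofList hTerm).keys) t from rfl]
      rw [List.contains_iff_mem, PySem.Set.mem_ofList]
    have hst1_ge : st ≤ st1 := by rw [hst1def]; split <;> omega
    have hst1_0 : 0 ≤ st1 := le_trans hst0 hst1_ge
    have hst1_le : st1 ≤ (i : Int) := by rw [hst1def]; split <;> omega
    have hst1_win : (i : Int) - W + 1 ≤ st1 := by rw [hst1def]; split <;> omega
    have hlast1 : ∀ t ∈ (PySem.Dict.ofList hTerm).keys,
        last1.getD t (-1) = pvLastIdx vCol t (i + 1) := by
      intro t ht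
      rw [hlast1def]
      by_cases hwK : w ∈ (PySem.Dict.ofList hTerm).keys
      · rw [if_pos ((hmemneed w).mpr hwK)]
        rw [PySem.Dict.getD_insert]
        by_cases htw : t = w
        · subst htw
          rw [if_pos rfl]
          simp only [pvLastIdx]
          rw [if_pos hvi]
        · rw [if_neg htw, hlast t ht]
          simp only [pvLastIdx]
          rw [if_neg (fun hcontra => htw (Option.some.inj (hvi ▸ hcontra)).symm)]
      · rw [if_neg (fun hc => hwK ((hmemneed w).mp hc))]
        rw [hlast t ht]
        have htw : t ≠ w := fun h => hwK (h ▸ ht)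
        simp only [pvLastIdx]
        rw [if_neg (fun hcontra => htw (Option.some.inj (hvi ▸ hcontra)).symm)]
    have hnc1 : ∀ j : Nat, j ≤ i → ¬ pvCovers vCol (PySem.Dict.ofList hTerm).keys st1 j :=
      fun j hj hcv => hnc j hj (pvCovers_anti_lo hst1_ge hcv)
    have hcond_iff : ((PySem.Set.ofList (PySem.Dict.ofList hTerm).keys).all
          (fun t => decide (st1 ≤ last1.getD t (-1))) = true)
        ↔ pvCovers vCol (PySem.Dict.ofList hTerm).keys st1 (i + 1) := by
      rw [List.all_eq_true]
      constructor
      · intro h t ht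
        have h' := h t ((PySem.Set.mem_ofList _ _).mpr ht)
        rw [decide_eq_true_eq] at h'
        rw [hlast1 t ht] at h'
        exact (pvLastIdx_ge_iff vCol t hst1_0 (i + 1)).mp h'
      · intro h t ht'
        have ht := (PySem.Set.mem_ofList _ _).mp ht'
        rw [decide_eq_true_eq, hlast1 t ht]
        exact (pvLastIdx_ge_iff vCol t hst1_0 (i + 1)).mpr (h t ht)
    have hstall : UWNonOverlap_loop vCol hTerm W st.toNat
        = UWNonOverlap_loop vCol hTerm W st1.toNat := by
      by_cases hcl : st < (i : Int) - W + 1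
      · have hst1e : st1 = (i : Int) - W + 1 := by rw [hst1def, if_pos hcl]
        have hsh := loop_shift vCol hTerm W (st1.toNat - st.toNat) st.toNat ?_
        · rw [hsh]
          congr 1
          omega
        · intro u hu1 hu2 hu3
          refine inner_none_of_nc vCol hTerm W hK st i u (by omega) (by omega) hnc (fun j hj => ?_)
          have hb : (j : Int) < min ((u : Int) + W) ((vCol.length : Nat) : Int) := by
            unfold UWNonOverlap_winlen at hj
            omega
          omega
      · have hst1e : st1 = st := by rw [hst1def, if_neg hcl]
        rw [hst1e]
    by_cases hcond : ((PySem.Set.ofList (PySem.Dict.ofList hTerm).keys).all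
        (fun t => decide (st1 ≤ last1.getD t (-1))) = true)
    · rw [if_pos hcond]
      have hcover : pvCovers vCol (PySem.Dict.ofList hTerm).keys st1 (i + 1) := hcond_iff.mp hcond
      have hlen2 : st1.toNat + UWNonOverlap_winlen vCol W st1.toNat ≤ vCol.length := by
        unfold UWNonOverlap_winlen; omega
      have hinv0 : ∀ t, (PySem.Dict.ofList hTerm).contains t = true ↔
          (t ∈ (PySem.Dict.ofList hTerm).keys ∧ ¬ pvOcc vCol t st1 st1.toNat) := by
        intro t
        rw [PySem.Dict.contains_iff_mem_keys]
        exact ⟨fun h => ⟨h, pvOcc_empty (by omega)⟩, fun h => h.1⟩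
      obtain ⟨t0, ht0⟩ := mem_of_ne_nil hK
      have hspec := for_spec vCol (PySem.Dict.ofList hTerm).keys st1
        (UWNonOverlap_winlen vCol W st1.toNat) st1.toNat (PySem.Dict.ofList hTerm)
        (by omega) hlen2 hinv0 ⟨t0, ht0, pvOcc_empty (by omega)⟩
      have hsome : UWNonOverlap_for vCol (PySem.Dict.ofList hTerm) st1.toNat
          (UWNonOverlap_winlen vCol W st1.toNat) = some i := by
        rw [hspec i]
        refine ⟨by omega, ?_, hcover, hnc1 i le_rfl⟩
        have : (i : Int) < min (st1 + W) ((vCol.length : Nat) : Int) := by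
          omega
        unfold UWNonOverlap_winlen
        omega
      rw [hstall, loop_of_some vCol hTerm W st1.toNat i (by omega) hsome]
      have hnc2 : ∀ j : Nat, j ≤ i + 1 →
          ¬ pvCovers vCol (PySem.Dict.ofList hTerm).keys (((i + 1 : Nat) : Int)) j := by
        intro j hj hcv
        obtain ⟨p, hp1, hp2, -⟩ := hcv t0 ht0
        have : (p : Int) < ((i + 1 : Nat) : Int) := by exact_mod_cast lt_of_lt_of_le hp1 hj
        omega
      have ihres := ih (i + 1) (cnt + 1) ((i + 1 : Nat) : Int) last1 hrest
        (by positivity) le_rfl hlast1 hnc2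
      have hcast : ((i + 1 : Nat) : Int) = (i : Int) + 1 := by omega
      rw [hcast] at ihres
      rw [ihres]
      have ht1 : ((i : Int) + 1).toNat = i + 1 := by omega
      rw [ht1]
      ring
    · rw [if_neg hcond]
      have hncover : ¬ pvCovers vCol (PySem.Dict.ofList hTerm).keys st1 (i + 1) :=
        fun h => hcond (hcond_iff.mpr h)
      have hnc' : ∀ j : Nat, j ≤ i + 1 →
          ¬ pvCovers vCol (PySem.Dict.ofList hTerm).keys st1 j := by
        intro j hj
        rcases Nat.lt_succ_iff_lt_or_eq.mp (Nat.lt_succ_of_le hj) with h | h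
        · exact hnc1 j (by omega)
        · rw [h]; exact hncover
      have ihres := ih (i + 1) cnt st1 last1 hrest hst1_0 (by omega) hlast1 hnc'
      have hcast : ((i + 1 : Nat) : Int) = (i : Int) + 1 := by omega
      rw [hcast] at ihres
      rw [ihres, hstall]

theorem alt_fold_stall (hTerm : List (String × Int)) (W : Int) (hW : W ≤ 0)
    (hK : (PySem.Dict.ofList hTerm).keys ≠ []) :
    ∀ (suf : List String) (s cnt st : Int) (last : PySem.Dict String Int),
      (∀ t, last.getD t (-1) ≤ s - 1) →
      ((PySem.List.enumerate suf s).foldl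
          (UWNonOverlap_step (PySem.Set.ofList (PySem.Dict.ofList hTerm).keys) W) (cnt, st, last)).1
        = cnt := by
  intro suf
  induction suf with
  | nil =>
    intro s cnt st last _
    rw [PySem.List.enumerate_nil, List.foldl_nil]
  | cons w rest ih =>
    intro s cnt st last hle
    rw [PySem.List.enumerate_cons, List.foldl_cons]
    simp only [UWNonOverlap_step]
    set last1 := if PySem.Set.contains (PySem.Set.ofList (PySem.Dict.ofList hTerm).keys) w
        then last.insert w s else last with hlast1def
    set st1 := if st < s - W + 1 then s - W + 1 else st with hst1def
    have hlast1_le : ∀ t, last1.getD t (-1) ≤ s := by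
      intro t
      rw [hlast1def]
      split
      · rw [PySem.Dict.getD_insert]
        split
        · exact le_rfl
        · have := hle t; omega
      · have := hle t; omega
    have hst1_gt : s + 1 ≤ st1 := by rw [hst1def]; split <;> omega
    obtain ⟨t0, ht0⟩ := mem_of_ne_nil hK
    have hcond : ((PySem.Set.ofList (PySem.Dict.ofList hTerm).keys).all
        (fun t => decide (st1 ≤ last1.getD t (-1)))) = false := by
      rw [List.all_eq_false]
      refine ⟨t0, (PySem.Set.mem_ofList _ _).mpr ht0, ?_⟩
      rw [decide_eq_true_eq]
      have := hlast1_le t0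
      omega
    rw [if_neg (by rw [hcond]; exact Bool.false_ne_true)]
    exact ih (s + 1) cnt st1 last1 (fun t => by have := hlast1_le t; omega)

theorem keys_empty_contains (hTerm : List (String × Int))
    (hK : (PySem.Dict.ofList hTerm).keys = []) :
    ∀ t, (PySem.Dict.ofList hTerm).contains t = false := by
  intro t
  rw [← Bool.not_eq_true, PySem.Dict.contains_iff_mem_keys, hK]
  simp

-- ===== VERDICT (by name: the statement is the Claim_ definition above) =====
theorem UWNonOverlap_spec : Claim_equal_UWNonOverlap := by
  intro vCol hTerm W _
  unfold Spec_UWNonOverlap UWNonOverlap UWNonOverlap_alt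
  by_cases hK : (PySem.Dict.ofList hTerm).keys = []
  · have hset : PySem.Set.ofList (PySem.Dict.ofList hTerm).keys = ([] : List String) := by
      rw [hK]; rfl
    rw [hset]
    simp only [List.isEmpty_nil, if_true]
    apply loop_zero_of_fails
    intro u _ _
    exact for_none_of_empty vCol _ u _ (keys_empty_contains hTerm hK)
  · have hne : ¬ ((PySem.Set.ofList (PySem.Dict.ofList hTerm).keys).isEmpty = true) := by
      rw [List.isEmpty_iff]
      intro h
      obtain ⟨t0, ht0⟩ := mem_of_ne_nil hK
      have := (PySem.Set.mem_ofList _ _).mpr ht0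
      rw [h] at this
      cases this
    rw [if_neg hne]
    by_cases hW : 1 ≤ W
    · have hmain := alt_fold_main vCol hTerm W hW hK vCol 0 0 0 PySem.Dict.empty
        (by simp) le_rfl (by positivity)
        (fun t _ => by rw [PySem.Dict.getD_empty]; rfl)
        (fun j hj hcv => by
          obtain ⟨t0, ht0⟩ := mem_of_ne_nil hK
          obtain ⟨p, hp1, -, -⟩ := hcv t0 ht0
          omega)
      have h0 : ((0 : Nat) : Int) = (0 : Int) := rfl
      rw [h0] at hmain
      rw [hmain]
      norm_num
    · push_neg at hW
      have hA : UWNonOverlap_loop vCol hTerm W 0 = 0 := by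
        apply loop_zero_of_fails
        intro u _ _
        have hwl : UWNonOverlap_winlen vCol W u = 0 := by
          unfold UWNonOverlap_winlen; omega
        rw [hwl]
        rfl
      have hB := alt_fold_stall hTerm W (by omega) hK vCol 0 0 0 PySem.Dict.empty
        (fun t => by rw [PySem.Dict.getD_empty]; omega)
      rw [hA, hB]
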